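-- pv_equiv track=rewrite | github.com/michael-huitt/py_blackjack | blackjack.py | compare_scores
-- ===== SOURCE A (Python) =====
-- def compare_scores(p1_score, p2_score):
--         scores = [p1_score, p2_score]
--         scores.sort(reverse = True)
--
--         for score in scores:
--             if int(score) > 21:
--                 scores.remove(score)
--
--         if len(scores) == 1:
--             return scores[0]
--
--         elif len(scores) == 0:
--             return 1
--
--         elif len(scores) == 2:
--             if scores[0] != scores[1]:
--                 return scores[0]
--
--             else:
--                 return 0
-- ===== SOURCE B (Python) =====
-- def compare_scores(p1_score, p2_score):
--     hi = max(p1_score, p2_score)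
--     lo = min(p1_score, p2_score)
--     if hi > 21:
--         # higher score busts (possibly both): A's remove-while-iterating loop
--         # drops only the higher one, so the lower value is returned
--         return lo
--     if hi == lo:
--         return 0
--     return hi
-- ===== Notes on version B (the rewrite author's own statement) =====
-- stated objective: simpler
-- what changed: Replaces the sort of a two-element list plus the remove-while-iterating bust filter and length case analysis with direct max/min and three comparisons; the unreachable return-1 branch disappears.
import Mathlib
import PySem

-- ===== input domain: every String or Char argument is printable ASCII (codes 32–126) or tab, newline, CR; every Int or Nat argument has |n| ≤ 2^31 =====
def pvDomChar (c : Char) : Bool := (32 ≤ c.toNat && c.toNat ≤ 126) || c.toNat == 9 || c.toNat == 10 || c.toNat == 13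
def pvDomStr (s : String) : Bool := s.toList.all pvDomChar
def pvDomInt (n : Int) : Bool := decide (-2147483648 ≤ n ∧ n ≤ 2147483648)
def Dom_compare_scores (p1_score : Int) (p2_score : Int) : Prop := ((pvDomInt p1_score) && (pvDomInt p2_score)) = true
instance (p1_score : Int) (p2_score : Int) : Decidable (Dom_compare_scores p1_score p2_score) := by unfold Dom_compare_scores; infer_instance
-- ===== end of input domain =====

-- B replaces A's sort + remove-while-iterating bust filter + length case analysis
-- with direct max/min and three comparisons (objective: simpler).

-- ===== PORT A =====
-- termination helper for csLoop (list.remove never lengthens the list)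
theorem removeGetD_length_le (xs : List Int) (v : Int) :
    ((PySem.List.remove? xs v).getD xs).length ≤ xs.length := by
  by_cases hv : v ∈ xs
  · rw [PySem.List.remove?_eq_some_erase xs v hv]
    simp [List.length_erase]
    split <;> omega
  · rw [(PySem.List.remove?_eq_none_iff xs v).mpr hv]
    simp

-- Python's `for score in scores: if int(score) > 21: scores.remove(score)`:
-- iteration by advancing index over the list being mutated in place.
def csLoop (scores : List Int) (i : Nat) : List Int :=
  if h : i < scores.length then
    if scores[i] > 21 then
      csLoop ((PySem.List.remove? scores scores[i]).getD scores) (i + 1)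
    else
      csLoop scores (i + 1)
  else scores
termination_by scores.length - i
decreasing_by
  · have := removeGetD_length_le scores scores[i]
    omega
  · omega

def compare_scores (p1_score : Int) (p2_score : Int) : Int :=
  let scores := PySem.List.sorted [p1_score, p2_score] (fun x => x) true
  let scores := csLoop scores 0
  if scores.length == 1 then
    ((PySem.List.pyGet? scores 0).getD 0)
  else if scores.length == 0 then
    1
  else -- len == 2
    if ((PySem.List.pyGet? scores 0).getD 0) ≠ ((PySem.List.pyGet? scores 1).getD 0) then
      ((PySem.List.pyGet? scores 0).getD 0)
    else
      0

-- ===== PORT B =====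
def compare_scores_alt (p1_score : Int) (p2_score : Int) : Int :=
  let hi := max p1_score p2_score
  let lo := min p1_score p2_score
  if hi > 21 then lo
  else if hi == lo then 0
  else hi

-- ===== PRECONDITION & SPEC =====
def Spec_compare_scores (p1_score : Int) (p2_score : Int) (out : Int) : Prop := out = compare_scores_alt p1_score p2_score
instance (p1_score : Int) (p2_score : Int) (out : Int) : Decidable (Spec_compare_scores p1_score p2_score out) := by unfold Spec_compare_scores; infer_instance

-- ===== CLAIM (what is proved, stated in full; the proofs are below) =====
def Claim_equal_compare_scores : Prop := ∀ (p1_score : Int) (p2_score : Int), Dom_compare_scores p1_score p2_score → Spec_compare_scores p1_score p2_score (compare_scores p1_score p2_score)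

-- ===== LEMMAS AND PROOFS =====

-- sorting the two-element list descending yields [hi, lo]
theorem sorted_pair (a b : Int) :
    PySem.List.sorted [a, b] (fun x => x) true = [max a b, min a b] := by
  rcases lt_trichotomy a b with h | h | h
  · have := PySem.List.sorted_rev_eq_of_perm_of_pairwise_gt
      (xs := [a, b]) (key := fun x => x) (ys := [b, a])
      (List.Perm.swap a b []) (by simp [h])
    rw [this]
    simp [max_eq_right h.le, min_eq_left h.le]
  · subst h
    have := PySem.List.sorted_rev_eq_self_of_pairwise
      (xs := [a, a]) (key := fun x => x) (by simp)
    rw [this]; simp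
  · have := PySem.List.sorted_rev_eq_self_of_pairwise
      (xs := [a, b]) (key := fun x => x) (by simp [h.le])
    rw [this]
    simp [max_eq_left h.le, min_eq_right h.le]

-- the bust-removal loop on [hi, lo]: if hi busts it is removed and the loop
-- stops (the index passes the shortened list), otherwise lo ≤ hi ≤ 21 and
-- nothing is removed
theorem csLoop_pair (a b : Int) :
    csLoop [max a b, min a b] 0 =
      if max a b > 21 then [min a b] else [max a b, min a b] := by
  have hle : min a b ≤ max a b := min_le_max
  by_cases h1 : max a b > 21
  · rw [if_pos h1, csLoop.eq_def]
    simp only [List.length_cons, List.length_nil, List.getElem_cons_zero]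
    rw [dif_pos (by omega), if_pos h1, PySem.List.remove?_cons_self]
    rw [csLoop.eq_def]
    simp
  · rw [if_neg h1, csLoop.eq_def]
    simp only [List.length_cons, List.length_nil, List.getElem_cons_zero]
    rw [dif_pos (by omega), if_neg h1, csLoop.eq_def]
    simp only [List.length_cons, List.length_nil, List.getElem_cons_succ,
      List.getElem_cons_zero]
    rw [dif_pos (by omega), if_neg (by omega), csLoop.eq_def]
    simp

-- ===== VERDICT (by name: the statement is the Claim_ definition above) =====
theorem compare_scores_spec : Claim_equal_compare_scores := by
  intro p1 p2 _
  unfold Spec_compare_scores compare_scores compare_scores_alt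
  simp only [sorted_pair, csLoop_pair]
  have hle : min p1 p2 ≤ max p1 p2 := min_le_max
  by_cases h1 : max p1 p2 > 21
  · rw [if_pos h1, if_pos h1]
    simp [PySem.List.pyGet?, PySem.List.pyIdx?]
  · rw [if_neg h1, if_neg h1]
    by_cases h3 : max p1 p2 = min p1 p2
    · simp [h3, PySem.List.pyGet?, PySem.List.pyIdx?]
    · simp [h3, PySem.List.pyGet?, PySem.List.pyIdx?]
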